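-- pv_equiv track=rewrite | github.com/jeremylumanbailey/PASSWORD_SECURITY_PROGRAM | main.py | check_dup_letters
-- ===== SOURCE A (Python) =====
-- def check_dup_letters(chk):
--     count = 0
--     for char in chk:
--         if char.isalpha():
--             count = count + 1
--         else:
--             count = 0
--         if count == 4:
--             return True
--     return False
-- ===== SOURCE B (Python) =====
-- def check_dup_letters(chk):
--     # Sliding window: some window of 4 consecutive characters is all alphabetic.
--     return any(all(c.isalpha() for c in chk[i:i + 4]) for i in range(len(chk) - 3))
-- ===== Notes on version B (the rewrite author's own statement) =====
-- stated objective: idiomatic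
-- what changed: Replaced the resetting-counter loop with a one-line sliding-window check: any window of 4 consecutive characters that is entirely alphabetic.
import Mathlib
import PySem

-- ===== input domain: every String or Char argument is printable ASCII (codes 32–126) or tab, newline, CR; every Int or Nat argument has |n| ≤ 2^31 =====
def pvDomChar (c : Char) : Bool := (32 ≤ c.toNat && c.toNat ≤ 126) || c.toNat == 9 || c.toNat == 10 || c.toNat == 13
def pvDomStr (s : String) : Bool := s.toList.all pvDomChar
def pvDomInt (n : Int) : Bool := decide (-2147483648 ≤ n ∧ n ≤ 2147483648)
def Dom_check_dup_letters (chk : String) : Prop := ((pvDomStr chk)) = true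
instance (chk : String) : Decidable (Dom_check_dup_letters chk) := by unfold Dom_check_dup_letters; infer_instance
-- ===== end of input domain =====

-- B replaces A's resetting-counter loop with a sliding-window check (any 4-char window all alphabetic); same cost, more idiomatic.


-- ===== PORT A =====
-- the for-loop with early return, counter as Python int
def pvLoopA : List Char → Int → Bool
  | [], _ => false
  | c :: rest, count =>
      let count := if PySem.Chars.isalpha c then count + 1 else 0
      if count == 4 then true else pvLoopA rest count

def check_dup_letters (chk : String) : Bool := pvLoopA chk.toList 0

-- ===== PORT B =====
-- range(len(chk) - 3) is exact as List.range (len - 3): a negative Python bound gives the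
-- empty range, as does truncated Nat subtraction; the slice chk[i:i+4] with 0 ≤ i < len
-- is exactly (drop i).take 4.
def check_dup_letters_alt (chk : String) : Bool :=
  let l := chk.toList
  (List.range (l.length - 3)).any (fun i => ((l.drop i).take 4).all PySem.Chars.isalpha)

-- ===== PRECONDITION & SPEC =====
def Spec_check_dup_letters (chk : String) (out : Bool) : Prop := out = check_dup_letters_alt chk
instance (chk : String) (out : Bool) : Decidable (Spec_check_dup_letters chk out) := by unfold Spec_check_dup_letters; infer_instance

-- ===== CLAIM (what is proved, stated in full; the proofs are below) =====
def Claim_equal_check_dup_letters : Prop := ∀ (chk : String), Dom_check_dup_letters chk → Spec_check_dup_letters chk (check_dup_letters chk)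

-- ===== LEMMAS AND PROOFS =====

-- "the first k characters of l exist and are all alphabetic"
def prefOK (l : List Char) (k : Nat) : Bool := decide (k ≤ l.length) && (l.take k).all PySem.Chars.isalpha

-- recursive form of the sliding-window scan
def bwin : List Char → Bool
  | [] => false
  | c :: rest => prefOK (c :: rest) 4 || bwin rest

theorem prefOK_mono (l : List Char) {k k' : Nat} (hk : k' ≤ k) (h : prefOK l k = true) :
    prefOK l k' = true := by
  unfold prefOK at h ⊢
  simp only [Bool.and_eq_true, decide_eq_true_eq] at h ⊢
  obtain ⟨h1, h2⟩ := h
  refine ⟨le_trans hk h1, ?_⟩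
  refine List.all_eq_true.mpr (fun x hx => List.all_eq_true.mp h2 x ?_)
  have ht : l.take k' = (l.take k).take k' := by
    rw [List.take_take, Nat.min_eq_left hk]
  rw [ht] at hx
  exact List.take_subset _ _ hx

theorem bwin_absorb (l : List Char) (h : prefOK l 4 = true) : bwin l = true := by
  cases l with
  | nil => simp [prefOK] at h
  | cons c rest => simp [bwin, h]

theorem bwin_short (l : List Char) (h : l.length < 4) : bwin l = false := by
  induction l with
  | nil => rfl
  | cons c rest ih =>
      simp only [List.length_cons] at h
      have h1 : prefOK (c :: rest) 4 = false := by
        unfold prefOK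
        have hn : ¬ (4 ≤ (c :: rest).length) := by simp only [List.length_cons]; omega
        rw [decide_eq_false hn, Bool.false_and]
      rw [bwin, h1, ih (by omega)]
      rfl

-- the window scan of B equals bwin
theorem alt_eq_bwin (l : List Char) :
    (List.range (l.length - 3)).any (fun i => ((l.drop i).take 4).all PySem.Chars.isalpha)
      = bwin l := by
  induction l with
  | nil => rfl
  | cons c rest ih =>
      by_cases h : rest.length ≤ 2
      · have h0 : (c :: rest).length - 3 = 0 := by simp only [List.length_cons]; omega
        rw [h0]
        have hb : bwin (c :: rest) = false := bwin_short _ (by simp only [List.length_cons]; omega)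
        simp [hb]
      · have h3 : (c :: rest).length - 3 = (rest.length - 3) + 1 := by
          simp only [List.length_cons]; omega
        rw [h3, List.range_succ_eq_map]
        simp only [List.any_cons, List.any_map, List.drop_zero]
        have hfun : ((fun i => (((c :: rest).drop i).take 4).all PySem.Chars.isalpha) ∘ Nat.succ)
            = fun i => ((rest.drop i).take 4).all PySem.Chars.isalpha := by
          funext i; rfl
        rw [hfun, ih]
        have hpre : prefOK (c :: rest) 4 = ((c :: rest).take 4).all PySem.Chars.isalpha := by
          unfold prefOK
          have h4 : (4 : Nat) ≤ (c :: rest).length := by simp only [List.length_cons]; omega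
          rw [decide_eq_true h4, Bool.true_and]
        rw [bwin, ← hpre]

-- the counter loop with credit `count` equals: a run of (4 - count) leading alphas, or a window further in
theorem loopA_eq (l : List Char) : ∀ count : Nat, count ≤ 3 →
    pvLoopA l (count : Int) = (prefOK l (4 - count) || bwin l) := by
  induction l with
  | nil =>
      intro count hc
      have hp : prefOK [] (4 - count) = false := by
        unfold prefOK
        simp only [List.length_nil, List.take_nil, List.all_nil, Bool.and_true,
          decide_eq_false_iff_not]
        omega
      simp [pvLoopA, bwin, hp]
  | cons c rest ih =>
      intro count hc
      by_cases ha : PySem.Chars.isalpha c = true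
      · by_cases h3 : count = 3
        · subst h3
          have hA : pvLoopA (c :: rest) ((3 : Nat) : Int) = true := by
            norm_num [pvLoopA, ha]
          have hp : prefOK (c :: rest) 1 = true := by
            unfold prefOK; simp [ha]
          rw [hA, hp]
          rfl
        · have hc2 : count ≤ 2 := by omega
          have hstep : pvLoopA (c :: rest) (count : Int) = pvLoopA rest ((count + 1 : Nat) : Int) := by
            simp only [pvLoopA, ha, if_true]
            rw [if_neg (by simp only [beq_iff_eq]; omega)]
            norm_cast
          rw [hstep, ih (count + 1) (by omega)]
          have hpre : prefOK (c :: rest) (4 - count) = prefOK rest (4 - (count + 1)) := by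
            unfold prefOK
            rw [(by omega : 4 - count = (4 - (count + 1)) + 1)]
            simp [ha]
          have hpre4 : prefOK (c :: rest) 4 = prefOK rest 3 := by
            unfold prefOK; simp [ha]
          rw [hpre, bwin, hpre4]
          by_cases h34 : prefOK rest 3 = true
          · have h1 := prefOK_mono rest (show 4 - (count + 1) ≤ 3 by omega) h34
            rw [h1, h34]
            simp
          · rw [Bool.eq_false_iff.mpr h34]
            simp
      · have ha2 : PySem.Chars.isalpha c = false := Bool.eq_false_iff.mpr ha
        have hstep : pvLoopA (c :: rest) (count : Int) = pvLoopA rest ((0 : Nat) : Int) := by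
          simp [pvLoopA, ha2]
        rw [hstep, ih 0 (by omega)]
        have hpre0 : prefOK (c :: rest) (4 - count) = false := by
          unfold prefOK
          rw [(by omega : 4 - count = (4 - count - 1) + 1)]
          simp [ha2]
        have hpre4 : prefOK (c :: rest) 4 = false := by
          unfold prefOK; simp [ha2]
        rw [hpre0, bwin, hpre4]
        simp only [Bool.false_or]
        cases rest with
        | nil => simp [bwin, prefOK]
        | cons d r =>
            rw [bwin]
            by_cases hp : prefOK (d :: r) 4 = true
            · rw [hp]
              simp
            · rw [Bool.eq_false_iff.mpr hp]
              simp

-- ===== VERDICT (by name: the statement is the Claim_ definition above) =====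
theorem check_dup_letters_spec : Claim_equal_check_dup_letters := by
  intro chk _
  unfold Spec_check_dup_letters check_dup_letters check_dup_letters_alt
  rw [alt_eq_bwin]
  rw [(by norm_cast : (0 : Int) = ((0 : Nat) : Int)), loopA_eq chk.toList 0 (by omega)]
  by_cases hp : prefOK chk.toList 4 = true
  · rw [(by omega : 4 - 0 = 4), hp, bwin_absorb _ hp]
    simp
  · rw [(by omega : 4 - 0 = 4), Bool.eq_false_iff.mpr hp]
    simp
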